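-- pv_equiv track=rewrite | github.com/reversero/BioXNet | data_loader/GDSC/data_prepare.py | _cellLine_process
-- ===== SOURCE A (Python) =====
-- def _cellLine_process(cellLine_column_list):
--     '''
--     The cell lines in CNV and methylation data are in the format of LOUNH91_LUNG,
--     we need to remove the suffixes to match the cell lines in mutation data.
--     Note that for the repeated cell lines, we will remove them.
--     Args:
--         cellLine_list (list):
--     '''
--     cellLine_split_list = [x.split('_')[0] for x in cellLine_column_list]
--     cellLine_column2name_dict = dict()
--     for cellLine_column in cellLine_column_list:
--         cellLine = cellLine_column.split('_')[0]
--         if cellLine_split_list.count(cellLine) > 1: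
--             continue
--         cellLine_column2name_dict[cellLine_column] = cellLine
--     return cellLine_column2name_dict
-- ===== SOURCE B (Python) =====
-- def _cellLine_process(cellLine_column_list):
--     # Single streaming pass with retraction: optimistically record each first
--     # occurrence as unique; when its name shows up again, delete that earlier
--     # entry and blacklist the name for the rest of the stream.
--     result = {}
--     dead = set()        # names already seen at least twice
--     first_col = {}      # name -> column of its first occurrence
--     for col in cellLine_column_list:
--         name = col.split('_')[0]
--         if name in dead:
--             continue
--         if name in first_col:
--             del result[first_col[name]]
--             dead.add(name)
--         else:
--             first_col[name] = col
--             result[col] = name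
--     return result
-- ===== Notes on version B (the rewrite author's own statement) =====
-- stated objective: faster
-- what changed: Replaces A's two-stage count-then-filter (a per-column .count scan over the split list) with a single streaming pass with retraction: each first occurrence is inserted into the result immediately, and when its name repeats the earlier entry is deleted and the name blacklisted.
import Mathlib
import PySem

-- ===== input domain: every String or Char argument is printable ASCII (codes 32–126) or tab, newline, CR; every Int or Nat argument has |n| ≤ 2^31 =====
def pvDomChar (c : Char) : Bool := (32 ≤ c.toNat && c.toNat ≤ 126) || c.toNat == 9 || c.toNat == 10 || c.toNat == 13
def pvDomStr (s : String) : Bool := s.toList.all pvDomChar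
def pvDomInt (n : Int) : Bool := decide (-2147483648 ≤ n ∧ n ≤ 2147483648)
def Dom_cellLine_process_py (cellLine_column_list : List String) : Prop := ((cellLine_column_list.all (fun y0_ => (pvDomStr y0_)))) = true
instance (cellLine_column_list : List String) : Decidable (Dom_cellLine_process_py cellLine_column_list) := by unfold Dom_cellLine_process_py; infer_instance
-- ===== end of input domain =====

-- B replaces A's two-stage count-then-filter (a per-column .count scan, quadratic) by a
-- single streaming pass with retraction: each first occurrence is inserted immediately,
-- and when its name repeats the earlier entry is deleted and the name blacklisted
-- (objective: faster; a timing run measures it).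

-- ===== PORT A =====
-- x.split('_')[0]: split? is some (sep ≠ ""), the result is nonempty, so [0] is its head
def pvName (s : String) : String := (((PySem.Str.split? s "_").getD []).headD "")

def cellLine_process_py (cellLine_column_list : List String) : List (String × String) :=
  let cellLine_split_list := cellLine_column_list.map (fun x => pvName x)
  (cellLine_column_list.foldl
    (fun d cellLine_column =>
      let cellLine := pvName cellLine_column
      if cellLine_split_list.count cellLine > 1 then d
      else PySem.Dict.insert d cellLine_column cellLine)
    PySem.Dict.empty).items

-- ===== PORT B =====
-- loop body of Source B: state = (result, dead, first_col)
def pvStepB (st : PySem.Dict String String × PySem.Set String × PySem.Dict String String)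
    (col : String) :
    PySem.Dict String String × PySem.Set String × PySem.Dict String String :=
  let name := pvName col
  if PySem.Set.contains st.2.1 name then st
  else
    match PySem.Dict.get? st.2.2 name with
    | some c => (PySem.Dict.erase st.1 c, PySem.Set.add st.2.1 name, st.2.2)
    | none => (PySem.Dict.insert st.1 col name, st.2.1, PySem.Dict.insert st.2.2 name col)

def cellLine_process_py_alt (cellLine_column_list : List String) : List (String × String) :=
  (cellLine_column_list.foldl pvStepB
    ((PySem.Dict.empty : PySem.Dict String String), (PySem.Set.empty : PySem.Set String),
     (PySem.Dict.empty : PySem.Dict String String))).1.items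

-- ===== PRECONDITION & SPEC =====
def Spec_cellLine_process_py (cellLine_column_list : List String) (out : List (String × String)) : Prop := out = cellLine_process_py_alt cellLine_column_list
instance (cellLine_column_list : List String) (out : List (String × String)) : Decidable (Spec_cellLine_process_py cellLine_column_list out) := by unfold Spec_cellLine_process_py; infer_instance

-- ===== CLAIM (what is proved, stated in full; the proofs are below) =====
def Claim_equal_cellLine_process_py : Prop := ∀ (cellLine_column_list : List String), Dom_cellLine_process_py cellLine_column_list → Spec_cellLine_process_py cellLine_column_list (cellLine_process_py cellLine_column_list)

-- ===== LEMMAS AND PROOFS =====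

-- A's result, characterised: the columns whose name occurs exactly once, in list order
theorem A_char (l : List String) :
    cellLine_process_py l
      = (l.filter (fun c => decide ((l.filter (fun x => pvName x == pvName c)).length = 1))).map
          (fun c => (c, pvName c)) := by
  show (l.foldl
    (fun d c =>
      if (l.map (fun x => pvName x)).count (pvName c) > 1 then d
      else PySem.Dict.insert d c (pvName c))
    PySem.Dict.empty).items = _
  have hbody : ∀ (d : PySem.Dict String String) (c : String), c ∈ l →
      (if (l.map (fun x => pvName x)).count (pvName c) > 1 then d
       else PySem.Dict.insert d c (pvName c))
      = (if ¬ ((l.map (fun x => pvName x)).count (pvName c) > 1)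
         then PySem.Dict.insert d c (pvName c) else d) := by
    intro d c _
    rw [ite_not]
  rw [PySem.List.foldl_congr_mem _ _ _ _ hbody,
      PySem.List.foldl_ite_eq_foldl_filter
        (p := fun c => ¬ ((l.map (fun x => pvName x)).count (pvName c) > 1))
        (f := fun d c => PySem.Dict.insert d c (pvName c))]
  have hcnt : ∀ c ∈ l, (decide (¬ ((l.map (fun x => pvName x)).count (pvName c) > 1)))
      = decide ((l.filter (fun x => pvName x == pvName c)).length = 1) := by
    intro c hc
    have h1 : (l.map (fun x => pvName x)).count (pvName c)
        = (l.filter (fun x => pvName x == pvName c)).length := by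
      rw [List.count_eq_countP, List.countP_map, ← List.countP_eq_length_filter]
      rfl
    have h2 : c ∈ l.filter (fun x => pvName x == pvName c) :=
      List.mem_filter.2 ⟨hc, by simp⟩
    have h3 : 0 < (l.filter (fun x => pvName x == pvName c)).length :=
      List.length_pos_of_mem h2
    rw [h1]
    by_cases h : (l.filter (fun x => pvName x == pvName c)).length = 1
    · simp [h]
    · simp [h]; omega
  rw [List.filter_congr hcnt]
  set P : String → Bool := fun c => decide ((l.filter (fun x => pvName x == pvName c)).length = 1) with hP
  have hnodup : (l.filter P).Nodup := by
    rw [List.nodup_iff_count_le_one]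
    intro c
    by_cases hcm : c ∈ l.filter P
    · obtain ⟨hcl, hcp⟩ := List.mem_filter.1 hcm
      have h1 : (l.filter P).count c ≤ l.count c := List.Sublist.count_le c List.filter_sublist
      have h2 : l.count c ≤ (l.filter (fun x => pvName x == pvName c)).length := by
        rw [List.count_eq_countP, ← List.countP_eq_length_filter]
        apply List.countP_mono_left
        intro x _ hx
        have : x = c := by simpa using hx
        subst this
        simp
      have h3 : (l.filter (fun x => pvName x == pvName c)).length = 1 := by
        rw [hP] at hcp; simpa using hcp
      omega
    · rw [List.count_eq_zero_of_not_mem hcm]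
      omega
  rw [PySem.Dict.items_foldl_insert_fresh (l.filter P) (fun c => c) (fun c => pvName c)
        PySem.Dict.empty (by intro a _; exact PySem.Dict.contains_empty _)
        (by simpa using hnodup)]
  simp [PySem.Dict.empty]

-- count of name n in prefix p, through an appended column
theorem cnt_append (p : List String) (col : String) (n : String) :
    ((p ++ [col]).filter (fun x => pvName x == n)).length
      = (p.filter (fun x => pvName x == n)).length + (if pvName col = n then 1 else 0) := by
  rw [List.filter_append, List.length_append]
  by_cases h : pvName col = n
  · simp [List.filter, h]
  · have hb : (pvName col == n) = false := by simp [h]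
    simp [List.filter, hb, h]

-- the loop invariant of B: after processing p,
--   result.items = the unique-name columns of p (in order), paired with their names;
--   dead        = the names occurring ≥ 2 times in p;
--   first_col   = each name ↦ its first column in p
theorem B_inv (p : List String) :
    (p.foldl pvStepB
        ((PySem.Dict.empty : PySem.Dict String String), (PySem.Set.empty : PySem.Set String),
         (PySem.Dict.empty : PySem.Dict String String))).1.items
      = (p.filter (fun c => decide ((p.filter (fun x => pvName x == pvName c)).length = 1))).map
          (fun c => (c, pvName c))
    ∧ (∀ n, n ∈ (p.foldl pvStepB
        ((PySem.Dict.empty : PySem.Dict String String), (PySem.Set.empty : PySem.Set String),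
         (PySem.Dict.empty : PySem.Dict String String))).2.1
        ↔ 2 ≤ (p.filter (fun x => pvName x == n)).length)
    ∧ (∀ n, (p.foldl pvStepB
        ((PySem.Dict.empty : PySem.Dict String String), (PySem.Set.empty : PySem.Set String),
         (PySem.Dict.empty : PySem.Dict String String))).2.2.get? n
        = p.find? (fun c => pvName c == n)) := by
  induction p using List.reverseRecOn with
  | nil =>
    refine ⟨rfl, ?_, ?_⟩
    · intro n; simp [PySem.Set.empty]
    · intro n; rfl
  | append_singleton p col ih =>
    obtain ⟨hR, hD, hM⟩ := ih
    set st := p.foldl pvStepB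
        ((PySem.Dict.empty : PySem.Dict String String), (PySem.Set.empty : PySem.Set String),
         (PySem.Dict.empty : PySem.Dict String String)) with hst
    rw [List.foldl_append]
    simp only [List.foldl_cons, List.foldl_nil]
    have hcA := cnt_append p col
    by_cases hdead : pvName col ∈ st.2.1
    · -- the name is already dead (≥ 2 occurrences in p): the state is unchanged
      have hcont : PySem.Set.contains st.2.1 (pvName col) = true :=
        (PySem.Set.contains_iff _ _).2 hdead
      have hstep : pvStepB st col = st := by
        simp only [pvStepB, hcont, if_true]
      rw [hstep]
      have hcnt2 : 2 ≤ (p.filter (fun x => pvName x == pvName col)).length := (hD _).1 hdead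
      refine ⟨?_, ?_, ?_⟩
      · rw [hR, List.filter_append, List.filter_singleton]
        have hcol : decide (((p ++ [col]).filter (fun x => pvName x == pvName col)).length = 1) = false := by
          rw [decide_eq_false_iff_not, hcA (pvName col), if_pos rfl]
          omega
        rw [hcol]
        simp only [Bool.cond_false, List.append_nil]
        congr 1
        apply List.filter_congr
        intro x hx
        by_cases hxn : pvName x = pvName col
        · rw [hxn, hcA (pvName col), if_pos rfl]
          simp only [decide_eq_decide]
          omega
        · rw [hcA (pvName x), if_neg (Ne.symm hxn)]
          simp
      · intro m
        rw [hD m, hcA m]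
        by_cases hmn : pvName col = m
        · subst hmn
          rw [if_pos rfl]
          omega
        · rw [if_neg hmn]
          omega
      · intro m
        rw [hM m, List.find?_append]
        by_cases hmn : m = pvName col
        · rw [hmn]
          obtain ⟨x, hxp, hxm⟩ : ∃ x ∈ p, pvName x = pvName col := by
            cases hfe : p.filter (fun x => pvName x == pvName col) with
            | nil => rw [hfe] at hcnt2; simp at hcnt2
            | cons a t =>
              have ha : a ∈ p.filter (fun x => pvName x == pvName col) := by rw [hfe]; simp
              obtain ⟨h1, h2⟩ := List.mem_filter.1 ha
              exact ⟨a, h1, by simpa using h2⟩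
          cases hfnd : p.find? (fun c => pvName c == pvName col) with
          | some a => rfl
          | none =>
            exfalso
            have := (List.find?_eq_none.1 hfnd) x hxp
            simp [hxm] at this
        · cases hfnd : p.find? (fun c => pvName c == m) with
          | some a => rfl
          | none =>
            have hcolf : List.find? (fun c => pvName c == m) [col] = none := by
              simp [Ne.symm hmn]
            rw [hcolf]; rfl
    · -- the name is not dead yet
      have hcont : PySem.Set.contains st.2.1 (pvName col) = false := by
        rw [← Bool.not_eq_true]
        exact fun h => hdead ((PySem.Set.contains_iff _ _).1 h)
      have hlt2 : ¬ 2 ≤ (p.filter (fun x => pvName x == pvName col)).length :=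
        fun h => hdead ((hD _).2 h)
      cases hf : st.2.2.get? (pvName col) with
      | some c =>
        -- second occurrence: retract the first one, blacklist the name
        have hstep : pvStepB st col
            = (PySem.Dict.erase st.1 c, PySem.Set.add st.2.1 (pvName col), st.2.2) := by
          simp only [pvStepB, hcont, Bool.false_eq_true, if_false, hf]
        rw [hstep]
        have hfind : p.find? (fun c' => pvName c' == pvName col) = some c := by
          rw [← hM _, hf]
        have hcp : c ∈ p := List.mem_of_find?_eq_some hfind
        have hcn : pvName c = pvName col := by simpa using List.find?_some hfind
        have hmemf : c ∈ p.filter (fun x => pvName x == pvName col) :=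
          List.mem_filter.2 ⟨hcp, by simp [hcn]⟩
        have hcnt1 : (p.filter (fun x => pvName x == pvName col)).length = 1 := by
          have := List.length_pos_of_mem hmemf
          omega
        have hfl : p.filter (fun x => pvName x == pvName col) = [c] := by
          obtain ⟨a, ha⟩ := List.length_eq_one_iff.1 hcnt1
          rw [ha] at hmemf ⊢
          simp at hmemf
          rw [hmemf]
        refine ⟨?_, ?_, ?_⟩
        · show st.1.items.filter (fun pr => !(pr.1 == c)) = _
          rw [hR, List.filter_map, List.filter_filter, List.filter_append,
              List.filter_singleton]
          have hcol : decide (((p ++ [col]).filter (fun x => pvName x == pvName col)).length = 1) = false := by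
            rw [decide_eq_false_iff_not, hcA (pvName col), if_pos rfl]
            omega
          rw [hcol]
          simp only [Bool.cond_false, List.append_nil]
          congr 1
          apply List.filter_congr
          intro x hx
          by_cases hxn : pvName x = pvName col
          · have hxc : x = c := by
              have hm : x ∈ p.filter (fun y => pvName y == pvName col) :=
                List.mem_filter.2 ⟨hx, by simp [hxn]⟩
              rw [hfl] at hm
              simpa using hm
            subst hxc
            rw [hxn, hcA (pvName col), if_pos rfl]
            simp [hcnt1]
          · have hxc : ¬ (x = c) := fun h => hxn (h ▸ hcn)
            rw [hcA (pvName x), if_neg (Ne.symm hxn)]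
            simp [Function.comp, hxc]
        · intro m
          rw [PySem.Set.mem_add, hD m, hcA m]
          by_cases hmn : pvName col = m
          · subst hmn
            rw [if_pos rfl]
            constructor
            · intro _; omega
            · intro _; right; rfl
          · rw [if_neg hmn]
            constructor
            · rintro (h | h)
              · omega
              · exact absurd h.symm hmn
            · intro h; left; omega
        · intro m
          show st.2.2.get? m = _
          rw [hM m, List.find?_append]
          by_cases hmn : m = pvName col
          · rw [hmn, hfind]
            rfl
          · cases hfnd : p.find? (fun c' => pvName c' == m) with
            | some a => rfl
            | none =>
              have hcolf : List.find? (fun c' => pvName c' == m) [col] = none := by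
                simp [Ne.symm hmn]
              rw [hcolf]; rfl
      | none =>
        -- first occurrence: record it optimistically
        have hstep : pvStepB st col
            = (PySem.Dict.insert st.1 col (pvName col), st.2.1,
               PySem.Dict.insert st.2.2 (pvName col) col) := by
          simp only [pvStepB, hcont, Bool.false_eq_true, if_false, hf]
        rw [hstep]
        have hfind : p.find? (fun c' => pvName c' == pvName col) = none := by
          rw [← hM _, hf]
        have hcnt0 : (p.filter (fun x => pvName x == pvName col)).length = 0 := by
          rw [List.length_eq_zero_iff, List.filter_eq_nil_iff]
          intro x hx
          have := (List.find?_eq_none.1 hfind) x hx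
          simpa using this
        have hnotn : ∀ x ∈ p, pvName x ≠ pvName col := by
          intro x hx
          have := (List.find?_eq_none.1 hfind) x hx
          simpa using this
        refine ⟨?_, ?_, ?_⟩
        · have hnc : st.1.contains col = false := by
            rw [← Bool.not_eq_true, PySem.Dict.contains_iff_mem_keys]
            intro hmemk
            have hkeys : st.1.keys
                = p.filter (fun c => decide ((p.filter (fun x => pvName x == pvName c)).length = 1)) := by
              simp only [PySem.Dict.keys, hR, List.map_map]
              simp only [Function.comp_def, List.map_id']
            rw [hkeys] at hmemk
            have hcolp : col ∈ p := (List.mem_filter.1 hmemk).1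
            exact hnotn col hcolp rfl
          rw [PySem.Dict.items_insert_of_not_contains _ _ hnc, hR, List.filter_append,
              List.filter_singleton]
          have hcol : decide (((p ++ [col]).filter (fun x => pvName x == pvName col)).length = 1) = true := by
            rw [hcA (pvName col), if_pos rfl, hcnt0]
            simp
          rw [hcol]
          simp only [Bool.cond_true, List.map_append, List.map_cons, List.map_nil]
          congr 2
          apply List.filter_congr
          intro x hx
          rw [hcA (pvName x), if_neg (Ne.symm (hnotn x hx))]
          simp
        · intro m
          rw [hD m, hcA m]
          by_cases hmn : pvName col = m
          · subst hmn
            rw [if_pos rfl, hcnt0]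
            omega
          · rw [if_neg hmn]
            omega
        · intro m
          rw [PySem.Dict.get?_insert, List.find?_append]
          by_cases hmn : m = pvName col
          · rw [hmn, if_pos rfl, hfind]
            simp [Option.or]
          · rw [if_neg hmn, hM m]
            cases hfnd : p.find? (fun c' => pvName c' == m) with
            | some a => rfl
            | none =>
              have hcolf : List.find? (fun c' => pvName c' == m) [col] = none := by
                simp [Ne.symm hmn]
              rw [hcolf]; rfl

theorem ports_eq (l : List String) : cellLine_process_py l = cellLine_process_py_alt l := by
  rw [A_char]
  exact (B_inv l).1.symm

-- ===== VERDICT (by name: the statement is the Claim_ definition above) =====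
theorem cellLine_process_py_spec : Claim_equal_cellLine_process_py := by
  intro l _
  show cellLine_process_py l = cellLine_process_py_alt l
  exact ports_eq l
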